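-- pv_equiv track=rewrite | github.com/omron-sinicx/transformer4sr | model/_utils.py | get_permutation_idx
-- ===== SOURCE A (Python) =====
-- def get_permutation_idx(idx_list, k, nb_done):
--     """
--     Provides the indices used to place the completed
--     equations at the bottom of the list, and continue the beam search
--     """
--     permut_idx = []
--     for i in range(k-nb_done):
--         if not i in idx_list:
--             permut_idx.append(int(i))
--     for i in range(k-nb_done):
--         if i in idx_list:
--             permut_idx.append(int(i))
--     for i in range(nb_done):
--         permut_idx.append(int(k-nb_done+i))
--     return permut_idx
-- ===== SOURCE B (Python) =====
-- def get_permutation_idx(idx_list, k, nb_done):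
--     """
--     Provides the indices used to place the completed
--     equations at the bottom of the list, and continue the beam search
--     """
--     head = sorted(range(k - nb_done), key=lambda i: i in idx_list)
--     return head + list(range(k - nb_done, k))
-- ===== Notes on version B (the rewrite author's own statement) =====
-- stated objective: simpler
-- what changed: Replaces A's two explicit filtering loops over range(k-nb_done) plus an appending tail loop with a single stable sort by the boolean membership key (False before True) and a range literal for the tail.
import Mathlib
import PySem

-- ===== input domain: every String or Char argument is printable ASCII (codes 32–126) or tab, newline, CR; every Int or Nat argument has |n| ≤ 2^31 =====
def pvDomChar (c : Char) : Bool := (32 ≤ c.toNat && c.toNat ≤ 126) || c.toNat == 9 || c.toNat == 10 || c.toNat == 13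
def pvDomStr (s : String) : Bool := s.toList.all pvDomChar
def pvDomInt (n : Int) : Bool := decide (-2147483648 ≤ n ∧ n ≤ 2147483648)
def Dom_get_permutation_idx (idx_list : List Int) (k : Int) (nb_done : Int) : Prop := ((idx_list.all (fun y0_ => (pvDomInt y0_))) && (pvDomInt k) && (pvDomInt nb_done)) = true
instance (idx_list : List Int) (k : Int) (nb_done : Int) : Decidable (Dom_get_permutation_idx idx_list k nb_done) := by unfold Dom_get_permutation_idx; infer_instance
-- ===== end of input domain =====

-- ===== PORT A =====
-- Literal port of A: three append loops over Python ranges.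
def get_permutation_idx (idx_list : List Int) (k : Int) (nb_done : Int) : List Int :=
  let permut_idx : List Int := []
  let permut_idx := (PySem.List.pyRange 0 (k - nb_done) 1).foldl
    (fun acc i => if ¬ i ∈ idx_list then acc ++ [i] else acc) permut_idx
  let permut_idx := (PySem.List.pyRange 0 (k - nb_done) 1).foldl
    (fun acc i => if i ∈ idx_list then acc ++ [i] else acc) permut_idx
  let permut_idx := (PySem.List.pyRange 0 nb_done 1).foldl
    (fun acc i => acc ++ [k - nb_done + i]) permut_idx
  permut_idx

-- ===== PORT B =====
-- Port of B: stable sort of range(k-nb_done) by the membership key (Python's bool key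
-- False < True is ported as the Int key 0/1), then the fixed tail range(k-nb_done, k).
def get_permutation_idx_alt (idx_list : List Int) (k : Int) (nb_done : Int) : List Int :=
  PySem.List.sorted (PySem.List.pyRange 0 (k - nb_done) 1)
      (fun i => if i ∈ idx_list then (1 : Int) else 0) false
    ++ PySem.List.pyRange (k - nb_done) k 1

-- ===== PRECONDITION & SPEC =====
def Spec_get_permutation_idx (idx_list : List Int) (k : Int) (nb_done : Int) (out : List Int) : Prop := out = get_permutation_idx_alt idx_list k nb_done
instance (idx_list : List Int) (k : Int) (nb_done : Int) (out : List Int) : Decidable (Spec_get_permutation_idx idx_list k nb_done out) := by unfold Spec_get_permutation_idx; infer_instance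

-- ===== CLAIM (what is proved, stated in full; the proofs are below) =====
def Claim_equal_get_permutation_idx : Prop := ∀ (idx_list : List Int) (k : Int) (nb_done : Int), Dom_get_permutation_idx idx_list k nb_done → Spec_get_permutation_idx idx_list k nb_done (get_permutation_idx idx_list k nb_done)

-- ===== LEMMAS AND PROOFS =====

-- insertBy into a partitioned list f0 ++ f1 (x not-before everything in f0,
-- before everything in f1) lands exactly between the two blocks.
theorem pv_insertBy_partition {a : Type} (before : a -> a -> Bool) (x : a) :
    forall (f0 f1 : List a), (forall y, y ∈ f0 -> before x y = false) ->
    (forall y, y ∈ f1 -> before x y = true) ->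
    PySem.List.insertBy before x (f0 ++ f1) = f0 ++ x :: f1 := by
  intro f0
  induction f0 with
  | nil =>
    intro f1 _ h1
    cases f1 with
    | nil => simp [PySem.List.insertBy]
    | cons y ys => simp [PySem.List.insertBy, h1 y (by simp)]
  | cons a0 f0 ih =>
    intro f1 h0 h1
    simp only [List.cons_append, PySem.List.insertBy, h0 a0 (by simp)]
    simp [ih f1 (fun y hy => h0 y (by simp [hy])) h1]

-- The insertion-sort fold with the 0/1 membership key performs a stable partition.
theorem pv_sortfold (idx_list : List Int) :
    forall (xs f0 f1 : List Int),
    (forall y, y ∈ f0 -> ¬ y ∈ idx_list) -> (forall y, y ∈ f1 -> y ∈ idx_list) ->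
    xs.foldl (fun acc x => PySem.List.insertBy
        (fun a b => decide ((if a ∈ idx_list then (1 : Int) else 0) < (if b ∈ idx_list then (1 : Int) else 0)))
        x acc) (f0 ++ f1)
      = (f0 ++ xs.filter (fun x => decide (¬ x ∈ idx_list)))
        ++ (f1 ++ xs.filter (fun x => decide (x ∈ idx_list))) := by
  intro xs
  induction xs with
  | nil => intro f0 f1 _ _; simp
  | cons x xs ih =>
    intro f0 f1 h0 h1
    by_cases hx : x ∈ idx_list
    · have : PySem.List.insertBy
          (fun a b => decide ((if a ∈ idx_list then (1 : Int) else 0) < (if b ∈ idx_list then (1 : Int) else 0)))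
          x (f0 ++ f1) = (f0 ++ f1) ++ [x] := by
        apply PySem.List.insertBy_of_forall_not_before
        intro y _; by_cases hy : y ∈ idx_list <;> simp [hx, hy]
      simp only [List.foldl_cons, this, List.append_assoc]
      have := ih f0 (f1 ++ [x]) h0 (by intro y hy; rcases List.mem_append.mp hy with h | h
                                       · exact h1 y h
                                       · simp at h; simpa [h] using hx)
      simp only [List.append_assoc] at this
      rw [this]
      simp [hx, List.filter]
    · have : PySem.List.insertBy
          (fun a b => decide ((if a ∈ idx_list then (1 : Int) else 0) < (if b ∈ idx_list then (1 : Int) else 0)))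
          x (f0 ++ f1) = (f0 ++ [x]) ++ f1 := by
        rw [pv_insertBy_partition _ x f0 f1]
        · simp
        · intro y hy; simp [hx, h0 y hy]
        · intro y hy; simp [hx, h1 y hy]
      simp only [List.foldl_cons, this]
      have := ih (f0 ++ [x]) f1 (by intro y hy; rcases List.mem_append.mp hy with h | h
                                    · exact h0 y h
                                    · simp at h; simpa [h] using hx) h1
      rw [this]
      simp [hx, List.filter]

-- Specialisation of pv_sortfold to the empty accumulator (= sorted of the range).
theorem pv_sort_nil (idx_list xs : List Int) :
    xs.foldl (fun acc x => PySem.List.insertBy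
        (fun a b => decide ((if a ∈ idx_list then (1 : Int) else 0) < (if b ∈ idx_list then (1 : Int) else 0)))
        x acc) []
      = xs.filter (fun x => decide (¬ x ∈ idx_list)) ++ xs.filter (fun x => decide (x ∈ idx_list)) := by
  have h := pv_sortfold idx_list xs [] [] (by simp) (by simp)
  simpa using h

-- The tail loop of A produces exactly range(k-nb_done, k).
theorem pv_tail (k nb_done : Int) (acc : List Int) :
    (PySem.List.pyRange 0 nb_done 1).foldl (fun acc i => acc ++ [k - nb_done + i]) acc
      = acc ++ PySem.List.pyRange (k - nb_done) k 1 := by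
  rw [PySem.List.foldl_append_singleton_eq_map]
  congr 1
  rw [PySem.List.pyRange_one 0 nb_done, PySem.List.pyRange_one (k - nb_done) k]
  have : k - (k - nb_done) = nb_done - 0 := by ring
  rw [this]
  simp [List.map_map, Function.comp]

-- ===== VERDICT (by name: the statement is the Claim_ definition above) =====
theorem get_permutation_idx_spec : Claim_equal_get_permutation_idx := by
  intro idx_list k nb_done _
  unfold Spec_get_permutation_idx get_permutation_idx get_permutation_idx_alt
  rw [PySem.List.sorted_eq_foldl_insertBy]
  rw [pv_sort_nil]
  simp only [PySem.List.foldl_append_ite_eq_filter, pv_tail, List.nil_append, List.append_assoc]
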